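-- pv_equiv track=rewrite | github.com/LLNL/FPChecker | cpu_checking/line_highlighting.py | calc_lines_to_highligh
-- ===== SOURCE A (Python) =====
-- def calc_lines_to_highligh(file_len:int, highligth_set:set):
--   padding_set = set([])
--   dots_set = set([])
--   for l in highligth_set:
--     before = l-1
--     after = l+1
--     dots_before = before-1
--     dots_after = after+1
--     if before >= 1:
--       padding_set.add(before)
--     if after <= file_len:
--       padding_set.add(after)
--     if dots_before >= 1:
--       dots_set.add(dots_before)
--     if dots_after <= file_len:
--       dots_set.add(dots_after)
--
--   #d = defaultdict(char)
--   d = {}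
--   for i in range(file_len):
--     line = i+1
--     if line in dots_set:
--       d[line] = 'D'
--     if line in padding_set:
--       d[line] = 'P'
--     if line in highligth_set:
--       d[line] = 'H'
--
--   return d
-- ===== SOURCE B (Python) =====
-- def calc_lines_to_highligh(file_len:int, highligth_set:set):
--   cands = set()
--   for l in highligth_set:
--     for c in (l-2, l-1, l, l+1, l+2):
--       if 1 <= c <= file_len:
--         cands.add(c)
--   d = {}
--   for c in sorted(cands):
--     if c in highligth_set:
--       d[c] = 'H'
--     elif c-1 in highligth_set or c+1 in highligth_set:
--       d[c] = 'P'
--     else: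
--       d[c] = 'D'
--   return d
-- ===== Notes on version B (the rewrite author's own statement) =====
-- stated objective: alternative
-- what changed: A scans every line 1..file_len and tests it against precomputed padding/dots sets; B never touches the file range: it collects only the candidate lines (each highlight +/-2, clipped to [1,file_len]), sorts them, and labels each by its distance to a highlight (0->H, 1->P, else D); O(|H| log |H|) instead of O(file_len + |H|), though not measurably faster on the generated inputs.
import Mathlib
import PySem

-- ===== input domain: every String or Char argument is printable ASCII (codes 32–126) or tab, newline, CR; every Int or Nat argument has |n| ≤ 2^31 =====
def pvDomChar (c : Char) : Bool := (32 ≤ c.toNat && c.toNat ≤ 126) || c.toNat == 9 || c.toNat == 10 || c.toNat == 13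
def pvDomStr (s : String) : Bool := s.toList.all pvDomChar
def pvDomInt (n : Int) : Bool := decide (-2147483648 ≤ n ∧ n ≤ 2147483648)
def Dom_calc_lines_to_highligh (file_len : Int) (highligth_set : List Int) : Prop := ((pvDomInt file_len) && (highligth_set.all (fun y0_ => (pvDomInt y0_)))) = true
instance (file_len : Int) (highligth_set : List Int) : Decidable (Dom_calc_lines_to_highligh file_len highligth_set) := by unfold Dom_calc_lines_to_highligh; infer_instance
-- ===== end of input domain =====

-- B replaces A's scan over all file_len lines by a scan over candidate lines only
-- (highlights ±2, clipped, sorted ascending, labelled by distance to a highlight).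

-- ===== PORT A =====
-- first loop of A: build (padding_set, dots_set) from the highlight set
def pvPadDots (file_len : Int) (hs : List Int) (st : PySem.Set Int × PySem.Set Int) :
    PySem.Set Int × PySem.Set Int :=
  hs.foldl (fun st l =>
    let before := l - 1
    let after := l + 1
    let dots_before := before - 1
    let dots_after := after + 1
    let st := if before ≥ 1 then (PySem.Set.add st.1 before, st.2) else st
    let st := if after ≤ file_len then (PySem.Set.add st.1 after, st.2) else st
    let st := if dots_before ≥ 1 then (st.1, PySem.Set.add st.2 dots_before) else st
    if dots_after ≤ file_len then (st.1, PySem.Set.add st.2 dots_after) else st) st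

-- body of A's second loop
def pvStepA (hs : List Int) (sets : PySem.Set Int × PySem.Set Int)
    (d : PySem.Dict Int String) (i : Int) : PySem.Dict Int String :=
  let line := i + 1
  let d := if line ∈ sets.2 then d.insert line "D" else d
  let d := if line ∈ sets.1 then d.insert line "P" else d
  if line ∈ hs then d.insert line "H" else d

def calc_lines_to_highligh (file_len : Int) (highligth_set : List Int) : List (Int × String) :=
  let sets := pvPadDots file_len highligth_set (PySem.Set.empty, PySem.Set.empty)
  ((PySem.List.pyRange 0 file_len 1).foldl (pvStepA highligth_set sets) PySem.Dict.empty).items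

-- ===== PORT B =====
-- candidate lines: every line within distance 2 of a highlight, clipped to [1, file_len]
def pvCands (file_len : Int) (hs : List Int) (s : PySem.Set Int) : PySem.Set Int :=
  hs.foldl (fun s l =>
    [l - 2, l - 1, l, l + 1, l + 2].foldl (fun s c =>
      if 1 ≤ c ∧ c ≤ file_len then PySem.Set.add s c else s) s) s

-- body of B's loop over the sorted candidates
def pvStepB (hs : List Int) (d : PySem.Dict Int String) (c : Int) : PySem.Dict Int String :=
  if c ∈ hs then d.insert c "H"
  else if (c - 1) ∈ hs ∨ (c + 1) ∈ hs then d.insert c "P"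
  else d.insert c "D"

def calc_lines_to_highligh_alt (file_len : Int) (highligth_set : List Int) : List (Int × String) :=
  let cands := pvCands file_len highligth_set PySem.Set.empty
  ((PySem.List.sorted cands (fun x => x)).foldl (pvStepB highligth_set) PySem.Dict.empty).items

-- ===== PRECONDITION & SPEC =====
def Spec_calc_lines_to_highligh (file_len : Int) (highligth_set : List Int) (out : List (Int × String)) : Prop := out = calc_lines_to_highligh_alt file_len highligth_set
instance (file_len : Int) (highligth_set : List Int) (out : List (Int × String)) : Decidable (Spec_calc_lines_to_highligh file_len highligth_set out) := by unfold Spec_calc_lines_to_highligh; infer_instance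

-- ===== CLAIM (what is proved, stated in full; the proofs are below) =====
def Claim_equal_calc_lines_to_highligh : Prop := ∀ (file_len : Int) (highligth_set : List Int), Dom_calc_lines_to_highligh file_len highligth_set → Spec_calc_lines_to_highligh file_len highligth_set (calc_lines_to_highligh file_len highligth_set)

-- ===== LEMMAS AND PROOFS =====

-- A's final value at a line, and B's
def pvLabA (pad : PySem.Set Int) (hs : List Int) (x : Int) : String :=
  if x ∈ hs then "H" else if x ∈ pad then "P" else "D"
def pvLabB (hs : List Int) (x : Int) : String :=
  if x ∈ hs then "H" else if (x - 1) ∈ hs ∨ (x + 1) ∈ hs then "P" else "D"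

theorem mem_pvPadDots_fst (fl : Int) (hs : List Int) (st : PySem.Set Int × PySem.Set Int)
    (x : Int) (hx1 : 1 ≤ x) (hx2 : x ≤ fl) :
    x ∈ (pvPadDots fl hs st).1 ↔ x ∈ st.1 ∨ (x + 1) ∈ hs ∨ (x - 1) ∈ hs := by
  induction hs generalizing st with
  | nil => simp [pvPadDots]
  | cons l hs ih =>
    show x ∈ (pvPadDots fl hs _).1 ↔ _
    rw [ih]
    by_cases hm : x ∈ st.1 <;> by_cases ha : (x + 1) ∈ hs <;> by_cases hb : (x - 1) ∈ hs <;>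
      simp only [List.mem_cons] <;>
      split_ifs <;>
      simp [PySem.Set.mem_add, hm, ha, hb] <;> omega

theorem mem_pvPadDots_snd (fl : Int) (hs : List Int) (st : PySem.Set Int × PySem.Set Int)
    (x : Int) (hx1 : 1 ≤ x) (hx2 : x ≤ fl) :
    x ∈ (pvPadDots fl hs st).2 ↔ x ∈ st.2 ∨ (x + 2) ∈ hs ∨ (x - 2) ∈ hs := by
  induction hs generalizing st with
  | nil => simp [pvPadDots]
  | cons l hs ih =>
    show x ∈ (pvPadDots fl hs _).2 ↔ _
    rw [ih]
    by_cases hm : x ∈ st.2 <;> by_cases ha : (x + 2) ∈ hs <;> by_cases hb : (x - 2) ∈ hs <;>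
      simp only [List.mem_cons] <;>
      split_ifs <;>
      simp [PySem.Set.mem_add, hm, ha, hb] <;> omega

theorem mem_foldl_clip (fl : Int) (cs : List Int) (s : PySem.Set Int) (x : Int) :
    x ∈ cs.foldl (fun s c => if 1 ≤ c ∧ c ≤ fl then PySem.Set.add s c else s) s ↔
      x ∈ s ∨ (x ∈ cs ∧ 1 ≤ x ∧ x ≤ fl) := by
  induction cs generalizing s with
  | nil => simp
  | cons c cs ih =>
    simp only [List.foldl_cons, ih, List.mem_cons]
    by_cases hm : x ∈ s <;> by_cases hc : x ∈ cs <;> split_ifs <;>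
      simp [PySem.Set.mem_add, hm, hc] <;> omega

theorem nodup_foldl_clip (fl : Int) (cs : List Int) (s : PySem.Set Int) (h : s.Nodup) :
    (cs.foldl (fun s c => if 1 ≤ c ∧ c ≤ fl then PySem.Set.add s c else s) s).Nodup := by
  induction cs generalizing s with
  | nil => exact h
  | cons c cs ih =>
    simp only [List.foldl_cons]
    apply ih
    split_ifs
    · exact PySem.Set.nodup_add _ _ h
    · exact h

theorem mem_pvCands (fl : Int) (hs : List Int) (s : PySem.Set Int) (x : Int) :
    x ∈ pvCands fl hs s ↔
      x ∈ s ∨ (1 ≤ x ∧ x ≤ fl ∧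
        ((x - 2) ∈ hs ∨ (x - 1) ∈ hs ∨ x ∈ hs ∨ (x + 1) ∈ hs ∨ (x + 2) ∈ hs)) := by
  induction hs generalizing s with
  | nil => simp [pvCands]
  | cons l hs ih =>
    show x ∈ pvCands fl hs _ ↔ _
    rw [ih, mem_foldl_clip]
    simp only [List.mem_cons]
    by_cases hm : x ∈ s <;>
      by_cases h1 : (x - 2) ∈ hs <;> by_cases h2 : (x - 1) ∈ hs <;> by_cases h3 : x ∈ hs <;>
      by_cases h4 : (x + 1) ∈ hs <;> by_cases h5 : (x + 2) ∈ hs <;>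
      (simp [hm, h1, h2, h3, h4, h5]; try omega)

theorem nodup_pvCands (fl : Int) (hs : List Int) (s : PySem.Set Int) (h : s.Nodup) :
    (pvCands fl hs s).Nodup := by
  induction hs generalizing s with
  | nil => exact h
  | cons l hs ih => exact ih _ (nodup_foldl_clip _ _ _ h)

-- A's three conditional overwrites at one line collapse to one conditional insert
theorem stepA_eq (hs : List Int) (sets : PySem.Set Int × PySem.Set Int)
    (d : PySem.Dict Int String) (i : Int) :
    pvStepA hs sets d i =
      if (i + 1) ∈ sets.2 ∨ (i + 1) ∈ sets.1 ∨ (i + 1) ∈ hs then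
        d.insert (i + 1) (pvLabA sets.1 hs (i + 1))
      else d := by
  unfold pvStepA pvLabA
  by_cases h2 : (i + 1) ∈ sets.2 <;> by_cases h1 : (i + 1) ∈ sets.1 <;>
    by_cases hh : (i + 1) ∈ hs <;>
    simp [h1, h2, hh, PySem.Dict.insert_insert_self]

theorem stepB_eq (hs : List Int) (d : PySem.Dict Int String) (c : Int) :
    pvStepB hs d c = d.insert c (pvLabB hs c) := by
  unfold pvStepB pvLabB
  split_ifs <;> rfl

theorem lab_eq (fl : Int) (hs : List Int) (x : Int) (hx1 : 1 ≤ x) (hx2 : x ≤ fl) :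
    pvLabA (pvPadDots fl hs (PySem.Set.empty, PySem.Set.empty)).1 hs x = pvLabB hs x := by
  have hp : x ∈ (pvPadDots fl hs (PySem.Set.empty, PySem.Set.empty)).1 ↔
      (x + 1) ∈ hs ∨ (x - 1) ∈ hs := by
    rw [mem_pvPadDots_fst fl hs (PySem.Set.empty, PySem.Set.empty) x hx1 hx2]
    simp [PySem.Set.empty]
  unfold pvLabA pvLabB
  by_cases h : x ∈ hs
  · simp [h]
  · simp only [h, if_false]
    rw [if_congr (hp.trans or_comm) rfl rfl]

-- ===== VERDICT (by name: the statement is the Claim_ definition above) =====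
theorem calc_lines_to_highligh_spec : Claim_equal_calc_lines_to_highligh := by
  intro fl hs _
  unfold Spec_calc_lines_to_highligh calc_lines_to_highligh calc_lines_to_highligh_alt
  show ((PySem.List.pyRange 0 fl 1).foldl
          (pvStepA hs (pvPadDots fl hs (PySem.Set.empty, PySem.Set.empty))) PySem.Dict.empty).items
      = ((PySem.List.sorted (pvCands fl hs PySem.Set.empty) (fun x => x)).foldl
          (pvStepB hs) PySem.Dict.empty).items
  set st := pvPadDots fl hs (PySem.Set.empty, PySem.Set.empty) with hstdef
  -- collapse both loop bodies to single inserts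
  have hfA : pvStepA hs st =
      fun d i => if (i + 1) ∈ st.2 ∨ (i + 1) ∈ st.1 ∨ (i + 1) ∈ hs then
        d.insert (i + 1) (pvLabA st.1 hs (i + 1)) else d := by
    funext d i; exact stepA_eq hs st d i
  have hfB : pvStepB hs = fun d c => d.insert c (pvLabB hs c) := by
    funext d c; exact stepB_eq hs d c
  rw [hfA]
  rw [hfB]
  rw [PySem.List.foldl_ite_eq_foldl_filter
      (fun i => (i + 1) ∈ st.2 ∨ (i + 1) ∈ st.1 ∨ (i + 1) ∈ hs)
      (fun (d : PySem.Dict Int String) i => d.insert (i + 1) (pvLabA st.1 hs (i + 1)))]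
  set L := (PySem.List.pyRange 0 fl 1).filter
      (fun i => decide ((i + 1) ∈ st.2 ∨ (i + 1) ∈ st.1 ∨ (i + 1) ∈ hs)) with hLdef
  have hLsub : ∀ i ∈ L, 0 ≤ i ∧ i < fl := by
    intro i hi
    rw [hLdef, List.mem_filter] at hi
    exact PySem.List.mem_pyRange_one.mp hi.1
  have hLpw : L.Pairwise (· < ·) :=
    (PySem.List.pairwise_lt_pyRange_one 0 fl).filter _
  have hLnd : L.Nodup := hLpw.imp ne_of_lt
  have hmappw : (L.map (fun x => x + 1)).Pairwise (· < · : Int → Int → Prop) :=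
    List.pairwise_map.mpr (hLpw.imp (fun h => by omega))
  have hmapnd : (L.map (fun x => x + 1)).Nodup := hmappw.imp ne_of_lt
  -- the sorted candidate list IS L shifted by one
  have hsorted : PySem.List.sorted (pvCands fl hs PySem.Set.empty) (fun x => x)
      = L.map (fun x => x + 1) := by
    apply PySem.List.sorted_eq_of_perm_of_pairwise_lt
    · rw [List.perm_ext_iff_of_nodup hmapnd
        (nodup_pvCands fl hs PySem.Set.empty List.nodup_nil)]
      intro a
      rw [mem_pvCands]
      simp only [List.mem_map, hLdef, List.mem_filter, PySem.List.mem_pyRange_one,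
        decide_eq_true_eq, PySem.Set.empty, List.not_mem_nil, false_or]
      constructor
      · rintro ⟨i, ⟨⟨h0, h1⟩, hcond⟩, rfl⟩
        have hb1 : (1 : Int) ≤ i + 1 := by omega
        have hb2 : i + 1 ≤ fl := by omega
        rw [mem_pvPadDots_snd fl hs _ _ hb1 hb2, mem_pvPadDots_fst fl hs _ _ hb1 hb2] at hcond
        simp [PySem.Set.empty] at hcond
        refine ⟨hb1, hb2, ?_⟩
        rw [show i + 1 - 1 = i from by omega]
        tauto
      · rintro ⟨hb1, hb2, hcond⟩
        refine ⟨a - 1, ⟨⟨by omega, by omega⟩, ?_⟩, by omega⟩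
        have ha : a - 1 + 1 = a := by omega
        rw [ha, mem_pvPadDots_snd fl hs _ _ hb1 hb2, mem_pvPadDots_fst fl hs _ _ hb1 hb2]
        simp [PySem.Set.empty]
        tauto
    · exact hmappw
  rw [hsorted]
  -- both folds insert fresh, strictly increasing keys: items = the mapped list
  rw [PySem.Dict.items_foldl_insert_fresh L (fun i => i + 1)
      (fun i => pvLabA st.1 hs (i + 1)) PySem.Dict.empty
      (fun a _ => PySem.Dict.contains_empty _) hmapnd,
    PySem.Dict.items_foldl_insert_fresh (L.map (fun x => x + 1)) (fun c => c)
      (fun c => pvLabB hs c) PySem.Dict.empty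
      (fun a _ => PySem.Dict.contains_empty _)
      (by simpa using hmapnd)]
  simp only [List.map_map]
  apply congrArg
  apply List.map_congr_left
  intro i hi
  have hb := hLsub i hi
  simp only [Function.comp]
  exact congrArg (fun s => (i + 1, s)) (by rw [hstdef]; exact lab_eq fl hs (i + 1) (by omega) (by omega))
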